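-- pv_equiv track=rewrite | github.com/facuguerrero/trainingExercises | maxsubarraysum/max_subarray_sum.py | solution
-- ===== SOURCE A (Python) =====
-- def solution(input_list, n):
--     """	Preconditions:
--         * inputList can't be null
--         * n can't be null
--         * elements in list must be ints """
--
--     list_len = len(input_list)
--     if not input_list or list_len < n: return None
--
--     initial_index = 0
--     max_sum = 0
--     for actual_index in range(n, list_len + 1):
--         partial_sum = sum(input_list[initial_index:actual_index])
--         if partial_sum > max_sum: max_sum = partial_sum
--         initial_index += 1
--     return max_sum
-- ===== SOURCE B (Python) =====
-- def solution(input_list, n):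
--     if not input_list or len(input_list) < n:
--         return None
--     window = sum(input_list[:n])
--     best = 0
--     if window > best:
--         best = window
--     for i in range(n, len(input_list)):
--         window += input_list[i] - input_list[i - n]
--         if window > best:
--             best = window
--     return best
-- ===== Notes on version B (the rewrite author's own statement) =====
-- stated objective: faster
-- what changed: Replaced the re-summing of each length-n slice inside the loop (O(L*n)) by a single running window sum updated incrementally with one addition and one subtraction per step (O(L)).
-- outside the precondition, e.g. on solution([5, 1, 2], -1): A returns 6, B raises IndexError
import Mathlib
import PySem

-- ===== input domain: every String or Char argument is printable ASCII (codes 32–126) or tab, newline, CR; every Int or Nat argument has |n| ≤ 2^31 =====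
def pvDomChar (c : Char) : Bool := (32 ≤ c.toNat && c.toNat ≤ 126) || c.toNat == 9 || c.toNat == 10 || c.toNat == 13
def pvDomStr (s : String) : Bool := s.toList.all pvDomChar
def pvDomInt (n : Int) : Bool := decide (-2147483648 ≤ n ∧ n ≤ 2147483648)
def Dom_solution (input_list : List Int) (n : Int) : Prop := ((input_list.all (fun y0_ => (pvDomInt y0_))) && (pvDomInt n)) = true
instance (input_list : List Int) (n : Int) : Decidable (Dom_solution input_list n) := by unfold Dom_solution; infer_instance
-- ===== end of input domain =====

-- B replaces A's per-window slice re-summation by an incremental sliding-window sum.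

-- ===== PORT A =====
def solution (input_list : List Int) (n : Int) : Option Int :=
  let list_len : Int := (input_list.length : Int)
  if input_list = [] ∨ list_len < n then none
  else
    let st := (PySem.List.pyRange n (list_len + 1) 1).foldl
      (fun (st : Int × Int) actual_index =>
        let partial_sum := (PySem.List.slice input_list (some st.1) (some actual_index)).sum
        (st.1 + 1, if partial_sum > st.2 then partial_sum else st.2)) (0, 0)
    some st.2

-- ===== PORT B =====
def solution_alt (input_list : List Int) (n : Int) : Option Int :=
  if input_list = [] ∨ (input_list.length : Int) < n then none
  else
    let window := (PySem.List.slice input_list none (some n)).sum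
    let best : Int := if window > 0 then window else 0
    -- input_list[i] and input_list[i-n] are in range throughout the loop (0 ≤ n ≤ i < len), so pyGetD's default is never used
    let st := (PySem.List.pyRange n (input_list.length : Int) 1).foldl
      (fun (st : Int × Int) i =>
        let w := st.1 + PySem.List.pyGetD input_list i 0 - PySem.List.pyGetD input_list (i - n) 0
        (w, if w > st.2 then w else st.2)) (window, best)
    some st.2

-- ===== PRECONDITION & SPEC =====
-- Pre_ excludes negative window sizes n (outside the task's natural domain): there A's negative-range/
-- negative-slice interplay returns accidental values while B's index arithmetic raises IndexError.
def Pre_solution (input_list : List Int) (n : Int) : Prop := 0 ≤ n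
instance (input_list : List Int) (n : Int) : Decidable (Pre_solution input_list n) := by unfold Pre_solution; infer_instance
def pvWitness_solution : List Int × Int := ([1, -2, 3, 4], 2)

def Spec_solution (input_list : List Int) (n : Int) (out : Option Int) : Prop := out = solution_alt input_list n
instance (input_list : List Int) (n : Int) (out : Option Int) : Decidable (Spec_solution input_list n out) := by unfold Spec_solution; infer_instance

-- ===== CLAIM (what is proved, stated in full; the proofs are below) =====
def Claim_equal_solution : Prop := ∀ (input_list : List Int) (n : Int), Dom_solution input_list n → Pre_solution input_list n → Spec_solution input_list n (solution input_list n)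

-- ===== LEMMAS AND PROOFS =====

-- sum of the length-m window of xs starting at position k
def wsum (xs : List Int) (m k : Nat) : Int := ((xs.drop k).take m).sum

-- running maximum of f 0 .. f (t-1) starting from a, written with the ports' literal 'if'
def runmax (f : Nat → Int) (t : Nat) (a : Int) : Int :=
  (List.range t).foldl (fun acc k => if f k > acc then f k else acc) a

lemma wsum_succ (xs : List Int) (m k : Nat) (h : m + k < xs.length) :
    wsum xs m (k + 1) = wsum xs m k + xs.getD (m + k) 0 - xs.getD k 0 := by
  have hk : k < xs.length := by omega
  have hd : xs[k] :: xs.drop (k+1) = xs.drop k := List.getElem_cons_drop hk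
  have h1 : wsum xs m k + xs.getD (m + k) 0 = ((xs.drop k).take (m+1)).sum := by
    rw [List.take_add_one]
    have : (xs.drop k)[m]? = some xs[m + k] := by
      rw [List.getElem?_drop]
      rw [List.getElem?_eq_getElem (by omega)]
      congr 1; congr 1; omega
    rw [this]
    simp [wsum, List.getD, List.getElem?_eq_getElem (show m + k < xs.length by omega)]
  have h2 : ((xs.drop k).take (m+1)).sum = xs.getD k 0 + wsum xs m (k+1) := by
    rw [← hd, List.take_succ_cons]
    simp [wsum, List.getD, List.getElem?_eq_getElem hk]
  omega

-- A's loop computes the running maximum of the slice sums, paired with the incremented start index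
lemma foldA_char (xs : List Int) (m : Nat) (t : Nat) (acc : Int) :
    ((List.range t).map (fun (k : Nat) => (m : Int) + (k : Int))).foldl
      (fun (st : Int × Int) actual_index =>
        let partial_sum := (PySem.List.slice xs (some st.1) (some actual_index)).sum
        (st.1 + 1, if partial_sum > st.2 then partial_sum else st.2)) (0, acc)
    = ((t : Int), runmax (fun k => wsum xs m k) t acc) := by
  induction t with
  | zero => simp [runmax]
  | succ t ih =>
    rw [List.range_succ, List.map_append, List.foldl_append, ih]
    simp only [List.map_cons, List.map_nil, List.foldl_cons, List.foldl_nil]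
    have hs : PySem.List.slice xs (some (t : Int)) (some ((m : Int) + (t : Int))) = (xs.drop t).take m := by
      rw [add_comm (m : Int) (t : Int), PySem.List.slice_natCast_add]
    simp only [runmax, List.range_succ, List.foldl_append, List.foldl_cons, List.foldl_nil]
    simp [hs, wsum]

-- B's loop maintains the current window sum and the running maximum of the later window sums
lemma foldB_char (xs : List Int) (m : Nat) (hm : m ≤ xs.length) (t : Nat) (ht : t ≤ xs.length - m) (b0 : Int) :
    ((List.range t).map (fun (k : Nat) => (m : Int) + (k : Int))).foldl
      (fun (st : Int × Int) i =>
        let w := st.1 + PySem.List.pyGetD xs i 0 - PySem.List.pyGetD xs (i - (m : Int)) 0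
        (w, if w > st.2 then w else st.2)) (wsum xs m 0, b0)
    = (wsum xs m t, runmax (fun k => wsum xs m (k + 1)) t b0) := by
  induction t with
  | zero => simp [runmax]
  | succ t ih =>
    rw [List.range_succ, List.map_append, List.foldl_append, ih (by omega)]
    simp only [List.map_cons, List.map_nil, List.foldl_cons, List.foldl_nil]
    have h1 : PySem.List.pyGetD xs ((m : Int) + (t : Int)) 0 = xs.getD (m + t) 0 := by
      rw [show ((m : Int) + (t : Int)) = ((m + t : Nat) : Int) by push_cast; ring,
          PySem.List.pyGetD_natCast]
    have h2 : PySem.List.pyGetD xs ((m : Int) + (t : Int) - (m : Int)) 0 = xs.getD t 0 := by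
      rw [show ((m : Int) + (t : Int) - (m : Int)) = ((t : Nat) : Int) by ring,
          PySem.List.pyGetD_natCast]
    have hw : wsum xs m t + xs.getD (m + t) 0 - xs.getD t 0 = wsum xs m (t + 1) :=
      (wsum_succ xs m t (by omega)).symm
    simp only [runmax, List.range_succ, List.foldl_append, List.foldl_cons, List.foldl_nil]
    simp only [h1, h2, hw]

-- peeling the first window off the running maximum
lemma runmax_shift (f : Nat → Int) (t : Nat) :
    runmax f (t + 1) 0 = runmax (fun k => f (k + 1)) t (if f 0 > 0 then f 0 else 0) := by
  simp only [runmax, List.range_succ_eq_map, List.foldl_cons, List.foldl_map, Nat.succ_eq_add_one]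

lemma solution_eq_alt (xs : List Int) (n : Int) (hpre : 0 ≤ n) :
    solution xs n = solution_alt xs n := by
  by_cases h : xs = [] ∨ (xs.length : Int) < n
  · simp only [solution, solution_alt, if_pos h]
  · obtain ⟨m, rfl⟩ : ∃ m : Nat, n = (m : Int) := ⟨n.toNat, (Int.toNat_of_nonneg hpre).symm⟩
    have hm : m ≤ xs.length := by
      rcases not_or.mp h with ⟨-, h2⟩
      omega
    have e1 : ((xs.length : Int) + 1 - (m : Int)).toNat = (xs.length - m) + 1 := by omega
    have e2 : ((xs.length : Int) - (m : Int)).toNat = xs.length - m := by omega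
    have hw0 : (PySem.List.slice xs none (some (m : Int))).sum = wsum xs m 0 := by
      rw [PySem.List.slice_to_natCast]
      simp [wsum]
    have hA : solution xs (m : Int) =
        some (runmax (fun k => wsum xs m k) (xs.length - m + 1) 0) := by
      simp only [solution, if_neg h]
      rw [show PySem.List.pyRange (m : Int) ((xs.length : Int) + 1) 1
            = (List.range ((xs.length - m) + 1)).map (fun (k : Nat) => (m : Int) + (k : Int)) by
          rw [PySem.List.pyRange_one, e1]]
      rw [foldA_char]
    have hB : solution_alt xs (m : Int) =
        some (runmax (fun k => wsum xs m (k + 1)) (xs.length - m)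
          (if wsum xs m 0 > 0 then wsum xs m 0 else 0)) := by
      simp only [solution_alt, if_neg h]
      rw [show PySem.List.pyRange (m : Int) (xs.length : Int) 1
            = (List.range (xs.length - m)).map (fun (k : Nat) => (m : Int) + (k : Int)) by
          rw [PySem.List.pyRange_one, e2]]
      rw [hw0]
      rw [foldB_char xs m hm (xs.length - m) (le_refl _)]
    rw [hA, hB, runmax_shift]

-- ===== VERDICT (by name: the statement is the Claim_ definition above) =====
theorem solution_spec : Claim_equal_solution := by
  intro input_list n _ hpre
  exact solution_eq_alt input_list n hpre
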